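-- pv_equiv track=rewrite | github.com/dli98/geetest | gsxt/v0.py | am
-- ===== SOURCE A (Python) =====
-- def am(this, G6X, a6X, V6X, i6X, B6X, w6X):
--     # J5X, 0, 12790, V5X, idx, 0, 37
--     L9q = 1
--     A6X = 16383 & a6X
--     Y6X = a6X >> 14
--     w6X -= 1
--     while w6X >= 0:
--         S6X = 16383 & this[G6X]  # '0b11111111111111'
--         v6X = this[G6X] >> 14
--         G6X += 1
--         b6X = Y6X * S6X + v6X * A6X;
--         S6X = A6X * S6X + ((16383 & b6X) << 14) + V6X[i6X] + B6X
--         B6X = (S6X >> 28) + (b6X >> 14) + Y6X * v6X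
--         V6X[i6X] = 268435455 & S6X
--         i6X += 1
--         w6X -= 1
--     return B6X
-- ===== SOURCE B (Python) =====
-- def am(this, G6X, a6X, V6X, i6X, B6X, w6X):
--     # Work word-at-a-time with Python's big ints: no 14-bit half-word splitting.
--     # Mutates V6X in place exactly like the original.
--     carry = B6X
--     for k in range(w6X):
--         total = a6X * this[G6X + k] + V6X[i6X + k] + carry
--         V6X[i6X + k] = total & 268435455
--         carry = total >> 28
--     return carry
-- ===== Notes on version B (the rewrite author's own statement) =====
-- stated objective: simpler
-- what changed: Replaced A's 14-bit half-word splitting with four partial products and a split carry by a single whole-word big-integer multiply-accumulate (total = a*this[G+k] + V[i+k] + carry; store total & 2^28-1, carry = total >> 28), and the decrementing while loop by a for over range(w6X).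
import Mathlib
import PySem

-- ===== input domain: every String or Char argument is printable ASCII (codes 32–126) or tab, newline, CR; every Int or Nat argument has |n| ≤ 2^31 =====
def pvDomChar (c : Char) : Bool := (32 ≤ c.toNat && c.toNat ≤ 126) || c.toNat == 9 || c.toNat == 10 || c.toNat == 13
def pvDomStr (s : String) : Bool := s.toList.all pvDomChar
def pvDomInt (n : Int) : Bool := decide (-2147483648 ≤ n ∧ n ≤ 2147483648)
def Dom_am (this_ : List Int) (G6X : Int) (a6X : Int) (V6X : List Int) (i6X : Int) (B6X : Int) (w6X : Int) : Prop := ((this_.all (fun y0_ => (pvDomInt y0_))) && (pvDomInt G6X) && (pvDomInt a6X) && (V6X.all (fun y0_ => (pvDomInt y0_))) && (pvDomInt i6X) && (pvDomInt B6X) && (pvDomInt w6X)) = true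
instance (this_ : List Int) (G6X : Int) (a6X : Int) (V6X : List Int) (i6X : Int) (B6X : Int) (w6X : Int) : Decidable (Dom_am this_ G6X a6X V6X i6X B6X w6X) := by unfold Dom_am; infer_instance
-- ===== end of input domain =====

-- B drops A's 14-bit half-word partial-product scheme and multiplies whole words with
-- big-integer arithmetic (objective: simpler). Both A and B mutate V6X in place in the
-- same way; the equivalence proved here is about the RETURN value only.

-- ===== PORT A =====
-- Literal port of A's while loop: state (G6X, V6X, i6X, B6X), fuel = number of iterations.
def amLoop (this_ : List Int) (A6X Y6X : Int) : Nat → Int → List Int → Int → Int → Int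
  | 0, _, _, _, B6X => B6X
  | n + 1, G6X, V6X, i6X, B6X =>
    match PySem.List.pyGet? this_ G6X, PySem.List.pyGet? V6X i6X with
    | some tG, some vi =>
      let S6X := PySem.Int.band 16383 tG
      let v6X := tG >>> (14 : Nat)
      let b6X := Y6X * S6X + v6X * A6X
      let S6X' := A6X * S6X + (PySem.Int.band 16383 b6X <<< 14) + vi + B6X
      let B6X' := (S6X' >>> (28 : Nat)) + (b6X >>> (14 : Nat)) + Y6X * v6X
      amLoop this_ A6X Y6X n (G6X + 1) (PySem.List.pySetD V6X i6X (PySem.Int.band 268435455 S6X')) (i6X + 1) B6X'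
    | _, _ => B6X   -- IndexError in Python: excluded by Pre_am

def am (this_ : List Int) (G6X : Int) (a6X : Int) (V6X : List Int) (i6X : Int) (B6X : Int) (w6X : Int) : Int :=
  amLoop this_ (PySem.Int.band 16383 a6X) (a6X >>> (14 : Nat)) w6X.toNat G6X V6X i6X B6X

-- ===== PORT B =====
-- Literal port of Source B: a fold over range(w6X) carrying (V6X, carry).
def am_alt (this_ : List Int) (G6X : Int) (a6X : Int) (V6X : List Int) (i6X : Int) (B6X : Int) (w6X : Int) : Int :=
  ((PySem.List.pyRange 0 w6X 1).foldl (fun st k =>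
      match PySem.List.pyGet? this_ (G6X + k), PySem.List.pyGet? st.1 (i6X + k) with
      | some tG, some vi =>
        let total := a6X * tG + vi + st.2
        (PySem.List.pySetD st.1 (i6X + k) (PySem.Int.band total 268435455), total >>> (28 : Nat))
      | _, _ => st)   -- IndexError in Python: excluded by Pre_am
    (V6X, B6X)).2

-- ===== PRECONDITION & SPEC =====
-- Pre_am excludes exactly the inputs on which A raises IndexError: every index
-- this[G6X+k] / V6X[i6X+k] touched by the w6X iterations must be in Python range
-- (negative indices wrap), i.e. the two index intervals fit inside [-len, len).
def Pre_am (this_ : List Int) (G6X : Int) (a6X : Int) (V6X : List Int) (i6X : Int) (B6X : Int) (w6X : Int) : Prop :=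
  w6X ≤ 0 ∨
    (-(this_.length : Int) ≤ G6X ∧ G6X + w6X ≤ (this_.length : Int) ∧
     -(V6X.length : Int) ≤ i6X ∧ i6X + w6X ≤ (V6X.length : Int))
instance (this_ : List Int) (G6X : Int) (a6X : Int) (V6X : List Int) (i6X : Int) (B6X : Int) (w6X : Int) : Decidable (Pre_am this_ G6X a6X V6X i6X B6X w6X) := by unfold Pre_am; infer_instance

def pvWitness_am : List Int × Int × Int × List Int × Int × Int × Int :=
  ([5, 7], 0, 12790, [1, 2], 0, 0, 2)

def Spec_am (this_ : List Int) (G6X : Int) (a6X : Int) (V6X : List Int) (i6X : Int) (B6X : Int) (w6X : Int) (out : Int) : Prop := out = am_alt this_ G6X a6X V6X i6X B6X w6X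
instance (this_ : List Int) (G6X : Int) (a6X : Int) (V6X : List Int) (i6X : Int) (B6X : Int) (w6X : Int) (out : Int) : Decidable (Spec_am this_ G6X a6X V6X i6X B6X w6X out) := by unfold Spec_am; infer_instance

-- ===== CLAIM (what is proved, stated in full; the proofs are below) =====
def Claim_equal_am : Prop := ∀ (this_ : List Int) (G6X : Int) (a6X : Int) (V6X : List Int) (i6X : Int) (B6X : Int) (w6X : Int), Dom_am this_ G6X a6X V6X i6X B6X w6X → Pre_am this_ G6X a6X V6X i6X B6X w6X → Spec_am this_ G6X a6X V6X i6X B6X w6X (am this_ G6X a6X V6X i6X B6X w6X)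

-- ===== LEMMAS AND PROOFS =====

theorem band16383_left (a : Int) : PySem.Int.band 16383 a = a % 16384 := by
  unfold PySem.Int.band
  rcases (by omega : 0 ≤ a ∨ a < 0) with h | h
  · rw [if_pos (by norm_num), if_pos h]
    have : (16383 : Int).toNat &&& a.toNat = a.toNat % 16384 := by
      have := Nat.and_two_pow_sub_one_eq_mod a.toNat 14
      rw [Nat.and_comm] at this
      simpa using this
    rw [this]; omega
  · rw [if_pos (by norm_num), if_neg (by omega)]
    have : (16383 : Int).toNat &&& (-a - 1).toNat = (-a - 1).toNat % 16384 := by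
      have := Nat.and_two_pow_sub_one_eq_mod (-a - 1).toNat 14
      rw [Nat.and_comm] at this
      simpa using this
    rw [this]; omega

theorem band268435455_left (a : Int) : PySem.Int.band 268435455 a = a % 268435456 := by
  unfold PySem.Int.band
  rcases (by omega : 0 ≤ a ∨ a < 0) with h | h
  · rw [if_pos (by norm_num), if_pos h]
    have : (268435455 : Int).toNat &&& a.toNat = a.toNat % 268435456 := by
      have := Nat.and_two_pow_sub_one_eq_mod a.toNat 28
      rw [Nat.and_comm] at this
      simpa using this
    rw [this]; omega
  · rw [if_pos (by norm_num), if_neg (by omega)]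
    have : (268435455 : Int).toNat &&& (-a - 1).toNat = (-a - 1).toNat % 268435456 := by
      have := Nat.and_two_pow_sub_one_eq_mod (-a - 1).toNat 28
      rw [Nat.and_comm] at this
      simpa using this
    rw [this]; omega

theorem band268435455_right (a : Int) : PySem.Int.band a 268435455 = a % 268435456 := by
  rw [PySem.Int.band_comm, band268435455_left]

theorem shr14 (a : Int) : a >>> (14 : Nat) = a / 16384 := by
  have := Int.shiftRight_eq_div_pow a 14
  norm_num at this
  exact this

theorem shr28 (a : Int) : a >>> (28 : Nat) = a / 268435456 := by
  have := Int.shiftRight_eq_div_pow a 28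
  norm_num at this
  exact this

theorem shl14 (a : Int) : a <<< (14 : Int) = a * 16384 := by
  have := Int.shiftLeft_eq_mul_pow a 14
  norm_num at this
  exact this

theorem step_aux (Y A v S q r vi B : Int) (h : 16384 * q + r = Y * S + v * A) :
    (16384 * Y + A) * (16384 * v + S) + vi + B
      = (A * S + r * 16384 + vi + B) + 268435456 * (q + Y * v) := by
  linear_combination (-16384 : Int) * h

-- The per-word identity: A's 14-bit partial-product combination differs from B's
-- whole-word product exactly by a multiple of 2^28 recorded in A's extra carry terms.
theorem step_key (a t vi B : Int) :
    a * t + vi + B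
      = ((a % 16384) * (t % 16384)
          + (((a / 16384) * (t % 16384) + (t / 16384) * (a % 16384)) % 16384) * 16384 + vi + B)
        + 268435456 * (((a / 16384) * (t % 16384) + (t / 16384) * (a % 16384)) / 16384
          + (a / 16384) * (t / 16384)) := by
  have hb := Int.ediv_add_emod ((a / 16384) * (t % 16384) + (t / 16384) * (a % 16384)) 16384
  have h1 := step_aux (a / 16384) (a % 16384) (t / 16384) (t % 16384)
    (((a / 16384) * (t % 16384) + (t / 16384) * (a % 16384)) / 16384)
    (((a / 16384) * (t % 16384) + (t / 16384) * (a % 16384)) % 16384) vi B hb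
  rw [Int.ediv_add_emod a 16384, Int.ediv_add_emod t 16384] at h1
  exact h1

-- Proof-side recursion mirroring B's per-step body.
def bLoop (this_ : List Int) (a6X G6X i6X : Int) : Nat → (List Int × Int) → (List Int × Int)
  | 0, st => st
  | n + 1, st =>
    match PySem.List.pyGet? this_ G6X, PySem.List.pyGet? st.1 i6X with
    | some tG, some vi =>
      let total := a6X * tG + vi + st.2
      bLoop this_ a6X (G6X + 1) (i6X + 1) n
        (PySem.List.pySetD st.1 i6X (PySem.Int.band total 268435455), total >>> (28 : Nat))
    | _, _ => bLoop this_ a6X (G6X + 1) (i6X + 1) n st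

theorem pyRange_nil {a b : Int} (h : b <= a) : PySem.List.pyRange a b 1 = [] := by
  unfold PySem.List.pyRange
  rw [if_neg (by norm_num)]
  simp only [show (0:Int) < 1 by norm_num, if_pos]
  rw [if_neg (by omega)]
  simp

theorem fold_to_bLoop (this_ : List Int) (a6X G6X i6X : Int) :
    ∀ (n : Nat) (s b : Int), b - s = n → ∀ (st : List Int × Int),
    (PySem.List.pyRange s b 1).foldl (fun st k =>
        match PySem.List.pyGet? this_ (G6X + k), PySem.List.pyGet? st.1 (i6X + k) with
        | some tG, some vi =>
          let total := a6X * tG + vi + st.2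
          (PySem.List.pySetD st.1 (i6X + k) (PySem.Int.band total 268435455), total >>> (28 : Nat))
        | _, _ => st) st
      = bLoop this_ a6X (G6X + s) (i6X + s) n st := by
  intro n
  induction n with
  | zero =>
    intro s b hsb st
    rw [pyRange_nil (by omega)]
    rfl
  | succ m ih =>
    intro s b hsb st
    rw [PySem.List.pyRange_one_cons (by push_cast at hsb; omega)]
    rw [List.foldl_cons]
    have hrec := ih (s + 1) b (by push_cast at hsb ⊢; omega)
    cases hG : PySem.List.pyGet? this_ (G6X + s) with
    | none =>
      rw [hrec st]
      show _ = bLoop this_ a6X (G6X + s) (i6X + s) (m + 1) st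
      conv_rhs => rw [bLoop]
      rw [hG]
      have : G6X + (s + 1) = G6X + s + 1 := by ring
      rw [this]
      have : i6X + (s + 1) = i6X + s + 1 := by ring
      rw [this]
    | some tG =>
      cases hV : PySem.List.pyGet? st.1 (i6X + s) with
      | none =>
        
        rw [hrec st]
        show _ = bLoop this_ a6X (G6X + s) (i6X + s) (m + 1) st
        conv_rhs => rw [bLoop]
        rw [hG, hV]
        have h1 : G6X + (s + 1) = G6X + s + 1 := by ring
        have h2 : i6X + (s + 1) = i6X + s + 1 := by ring
        rw [h1, h2]
      | some vi =>
        
        rw [hrec]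
        show _ = bLoop this_ a6X (G6X + s) (i6X + s) (m + 1) st
        conv_rhs => rw [bLoop]
        rw [hG, hV]
        have h1 : G6X + (s + 1) = G6X + s + 1 := by ring
        have h2 : i6X + (s + 1) = i6X + s + 1 := by ring
        rw [h1, h2]

theorem amLoop_to_bLoop (this_ : List Int) (a6X : Int) :
    ∀ (n : Nat) (G6X i6X : Int) (V6X : List Int) (B6X : Int),
    (∀ k : Nat, k < n → PySem.Raise.InRange this_.length (G6X + k) ∧ PySem.Raise.InRange V6X.length (i6X + k)) →
    amLoop this_ (PySem.Int.band 16383 a6X) (a6X >>> (14 : Nat)) n G6X V6X i6X B6X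
      = (bLoop this_ a6X G6X i6X n (V6X, B6X)).2 := by
  intro n
  induction n with
  | zero => intro G i V B _; rfl
  | succ m ih =>
    intro G i V B hpre
    have h0 := hpre 0 (Nat.succ_pos m)
    simp only [Nat.cast_zero, add_zero] at h0
    cases hG : PySem.List.pyGet? this_ G with
    | none =>
      exact absurd h0.1 ((PySem.List.pyGet?_eq_none_iff this_ G).mp hG)
    | some tG =>
      cases hV : PySem.List.pyGet? V i with
      | none =>
        exact absurd h0.2 ((PySem.List.pyGet?_eq_none_iff V i).mp hV)
      | some vi =>
        rw [amLoop]
        conv_rhs => rw [bLoop]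
        rw [hG, hV]
        simp only
        -- rewrite all bitwise ops into % and /
        have hstore :
            PySem.Int.band 268435455
              (PySem.Int.band 16383 a6X * PySem.Int.band 16383 tG
                + (PySem.Int.band 16383 ((a6X >>> (14 : Nat)) * PySem.Int.band 16383 tG + (tG >>> (14 : Nat)) * PySem.Int.band 16383 a6X) <<< 14)
                + vi + B)
            = PySem.Int.band (a6X * tG + vi + B) 268435455 := by
          rw [band268435455_left, band268435455_right, band16383_left, band16383_left,
            band16383_left, shr14, shr14, shl14]
          rw [step_key a6X tG vi B, Int.add_mul_emod_self_left]
        have hcarry :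
            ((PySem.Int.band 16383 a6X * PySem.Int.band 16383 tG
                + (PySem.Int.band 16383 ((a6X >>> (14 : Nat)) * PySem.Int.band 16383 tG + (tG >>> (14 : Nat)) * PySem.Int.band 16383 a6X) <<< 14)
                + vi + B) >>> (28 : Nat))
              + (((a6X >>> (14 : Nat)) * PySem.Int.band 16383 tG + (tG >>> (14 : Nat)) * PySem.Int.band 16383 a6X) >>> (14 : Nat))
              + (a6X >>> (14 : Nat)) * (tG >>> (14 : Nat))
            = (a6X * tG + vi + B) >>> (28 : Nat) := by
          rw [shr28, shr28, shr14, shr14, shr14, band16383_left, band16383_left,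
            band16383_left, shl14]
          rw [step_key a6X tG vi B, Int.add_mul_ediv_left _ _ (by norm_num)]
          ring_nf
        rw [hstore, hcarry]
        apply ih
        intro k hk
        have hk1 := hpre (k + 1) (by omega)
        rw [PySem.List.length_pySetD]
        have e1 : G + 1 + (k : Int) = G + ((k : Int) + 1) := by ring
        have e2 : i + 1 + (k : Int) = i + ((k : Int) + 1) := by ring
        rw [e1, e2]
        have h1 := hk1.1
        have h2 := hk1.2
        push_cast at h1 h2
        exact ⟨h1, h2⟩

theorem pyRange_toNat (w : Int) : PySem.List.pyRange 0 w 1 = PySem.List.pyRange 0 (w.toNat : Int) 1 := by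
  rcases (by omega : w ≤ 0 ∨ 0 < w) with h | h
  · rw [pyRange_nil h, pyRange_nil (by omega)]
  · congr 1; omega

-- ===== VERDICT (by name: the statement is the Claim_ definition above) =====
theorem am_spec : Claim_equal_am := by
  intro this_ G6X a6X V6X i6X B6X w6X _ hpre
  unfold Spec_am am am_alt
  have hq : ∀ k : Nat, k < w6X.toNat →
      PySem.Raise.InRange this_.length (G6X + k) ∧ PySem.Raise.InRange V6X.length (i6X + k) := by
    intro k hk
    unfold Pre_am at hpre
    unfold PySem.Raise.InRange
    omega
  rw [amLoop_to_bLoop this_ a6X w6X.toNat G6X i6X V6X B6X hq]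
  rw [pyRange_toNat]
  rw [fold_to_bLoop this_ a6X G6X i6X w6X.toNat 0 (w6X.toNat : Int) (by omega) (V6X, B6X)]
  rw [add_zero, add_zero]
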